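-- pv_equiv track=rewrite | github.com/pepyakasoftware/zhazha | telegram/main.py | _strip_entities
-- ===== SOURCE A (Python) =====
-- def _strip_entities(text, entities):
--     starts = [0]
--     ends = []
--     for e in entities:
--         starts.append(e['offset'] + e['length'])
--         ends.append(e['offset'])
--     ends.append(len(text))
--     result = []
--     for start, end in zip(starts, ends):
--         result.append(text[start:end])
--     return ''.join(result)
-- ===== SOURCE B (Python) =====
-- def _strip_entities(text, entities):
--     out = ''
--     bound = len(text)
--     for e in reversed(entities):
--         out = text[e['offset'] + e['length']:bound] + out
--         bound = e['offset']
--     return text[:bound] + out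
-- ===== Notes on version B (the rewrite author's own statement) =====
-- stated objective: alternative
-- what changed: Replaces A's two boundary lists (starts/ends) zipped into slices and joined by a right-to-left traversal of the entities that threads the upper slice bound and prepends each kept slice directly to the result string.
import Mathlib
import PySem

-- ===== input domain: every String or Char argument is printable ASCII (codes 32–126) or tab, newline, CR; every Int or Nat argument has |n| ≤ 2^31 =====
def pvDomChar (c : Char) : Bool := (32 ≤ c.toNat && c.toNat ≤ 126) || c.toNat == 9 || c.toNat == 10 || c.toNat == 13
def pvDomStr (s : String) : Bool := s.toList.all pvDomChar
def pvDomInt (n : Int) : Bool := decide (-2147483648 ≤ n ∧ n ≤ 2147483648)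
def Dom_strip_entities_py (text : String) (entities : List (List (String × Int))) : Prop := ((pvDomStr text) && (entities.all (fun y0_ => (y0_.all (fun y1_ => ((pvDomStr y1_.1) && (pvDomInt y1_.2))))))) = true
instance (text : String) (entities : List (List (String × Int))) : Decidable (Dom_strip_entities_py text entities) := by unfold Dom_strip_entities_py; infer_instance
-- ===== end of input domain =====

-- B traverses the entities RIGHT-TO-LEFT, threading the upper slice bound and prepending
-- each kept slice to the result string, instead of A's two boundary lists zipped and joined
-- (objective: alternative; return value only, neither version mutates its arguments).


-- ===== PORT A =====
-- e['offset'] / e['length'] KeyError inputs are excluded by Pre_; inside Pre_ getD's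
-- default is never used.
def strip_entities_py (text : String) (entities : List (List (String × Int))) : String :=
  let se := entities.foldl
    (fun (p : List Int × List Int) e =>
      let d : PySem.Dict String Int := PySem.Dict.mk e
      (p.1 ++ [d.getD "offset" 0 + d.getD "length" 0], p.2 ++ [d.getD "offset" 0]))
    ([0], [])
  let starts := se.1
  let ends := se.2 ++ [(PySem.Str.len text : Int)]
  let result := (starts.zip ends).foldl
    (fun (r : List String) p => r ++ [PySem.Str.slice text (some p.1) (some p.2)]) []
  PySem.Str.join "" result

-- ===== PORT B =====
-- Source B's reversed loop: state = (out, bound); Python string concatenation is carried out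
-- on the code-point list (String.ofList at the end), per the PySem convention.
def strip_entities_py_alt (text : String) (entities : List (List (String × Int))) : String :=
  let cs := text.toList
  let st := entities.reverse.foldl
    (fun (p : List Char × Int) e =>
      let d : PySem.Dict String Int := PySem.Dict.mk e
      (PySem.List.slice cs (some (d.getD "offset" 0 + d.getD "length" 0)) (some p.2) ++ p.1,
       d.getD "offset" 0))
    ([], (cs.length : Int))
  String.ofList (PySem.List.slice cs none (some st.2) ++ st.1)

-- ===== PRECONDITION & SPEC =====
-- Pre_ excludes exactly the entities missing an 'offset' or 'length' key, on which
-- Python A raises KeyError.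
def Pre_strip_entities_py (text : String) (entities : List (List (String × Int))) : Prop :=
  ∀ e ∈ entities, "offset" ∈ e.map Prod.fst ∧ "length" ∈ e.map Prod.fst
instance (text : String) (entities : List (List (String × Int))) : Decidable (Pre_strip_entities_py text entities) := by unfold Pre_strip_entities_py; infer_instance
def pvWitness_strip_entities_py : String × (List (List (String × Int))) :=
  ("hello world", [[("offset", 0), ("length", 6)]])

def Spec_strip_entities_py (text : String) (entities : List (List (String × Int))) (out : String) : Prop := out = strip_entities_py_alt text entities
instance (text : String) (entities : List (List (String × Int))) (out : String) : Decidable (Spec_strip_entities_py text entities out) := by unfold Spec_strip_entities_py; infer_instance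

-- ===== CLAIM (what is proved, stated in full; the proofs are below) =====
def Claim_equal_strip_entities_py : Prop := ∀ (text : String) (entities : List (List (String × Int))), Dom_strip_entities_py text entities → Pre_strip_entities_py text entities → Spec_strip_entities_py text entities (strip_entities_py text entities)

-- ===== LEMMAS AND PROOFS =====

-- the gap slices of text between the entity spans, as strings (A's view) …
def pvSegs (text : String) (L : Int) : List (List (String × Int)) → Int → List String
  | [], c => [PySem.Str.slice text (some c) (some L)]
  | e :: es, c =>
      let d : PySem.Dict String Int := PySem.Dict.mk e
      PySem.Str.slice text (some c) (some (d.getD "offset" 0)) ::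
        pvSegs text L es (d.getD "offset" 0 + d.getD "length" 0)

-- … and as code-point lists (B's view)
def pvSegsL (cs : List Char) (L : Int) : List (List (String × Int)) → Int → List (List Char)
  | [], c => [PySem.List.slice cs (some c) (some L)]
  | e :: es, c =>
      let d : PySem.Dict String Int := PySem.Dict.mk e
      PySem.List.slice cs (some c) (some (d.getD "offset" 0)) ::
        pvSegsL cs L es (d.getD "offset" 0 + d.getD "length" 0)

lemma pvSegs_toList (text : String) (L : Int) (es : List (List (String × Int))) (c : Int) :
    (pvSegs text L es c).map String.toList = pvSegsL text.toList L es c := by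
  induction es generalizing c with
  | nil => simp [pvSegs, pvSegsL, PySem.Str.slice]
  | cons e es ih => simp [pvSegs, pvSegsL, PySem.Str.slice, ih]

-- A's pair fold builds the two parallel lists
lemma pvA_fold (entities : List (List (String × Int))) (a b : List Int) :
    entities.foldl
      (fun (p : List Int × List Int) e =>
        let d : PySem.Dict String Int := PySem.Dict.mk e
        (p.1 ++ [d.getD "offset" 0 + d.getD "length" 0], p.2 ++ [d.getD "offset" 0]))
      (a, b)
    = (a ++ entities.map (fun e => (PySem.Dict.mk e).getD "offset" 0 + (PySem.Dict.mk e).getD "length" 0),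
       b ++ entities.map (fun e => (PySem.Dict.mk e).getD "offset" 0)) := by
  induction entities generalizing a b with
  | nil => simp
  | cons e es ih => simp [List.foldl_cons, ih]

-- A's zip-and-slice pass produces the cursor-threaded segments
lemma pvA_zip (text : String) (L : Int) (entities : List (List (String × Int)))
    (c : Int) (acc : List String) :
    ((c :: entities.map (fun e => (PySem.Dict.mk e).getD "offset" 0 + (PySem.Dict.mk e).getD "length" 0)).zip
        (entities.map (fun e => (PySem.Dict.mk e).getD "offset" 0) ++ [L])).foldl
      (fun (r : List String) p => r ++ [PySem.Str.slice text (some p.1) (some p.2)]) acc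
    = acc ++ pvSegs text L entities c := by
  induction entities generalizing c acc with
  | nil => simp [pvSegs]
  | cons e es ih => simp [List.zip_cons_cons, List.foldl_cons, ih, pvSegs]

-- ''.join of the segments is their flattening on the code-point side
lemma pvJoin_flatten (segs : List String) :
    (PySem.Str.join "" segs).toList = (segs.map String.toList).flatten := by
  have h : ∀ lss : List (List Char), PySem.Chars.join [] lss = lss.flatten := by
    intro lss
    induction lss with
    | nil => rfl
    | cons a l ih => cases l <;> simp_all [PySem.Chars.join, List.intercalate, List.intersperse]
  simp [pysem, h]

-- B's reversed fold, read as a foldr, concatenates the same segments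
lemma pvB_foldr (cs : List Char) (es : List (List (String × Int))) (c : Int) :
    PySem.List.slice cs (some c)
        (some ((es.foldr
          (fun e (p : List Char × Int) =>
            let d : PySem.Dict String Int := PySem.Dict.mk e
            (PySem.List.slice cs (some (d.getD "offset" 0 + d.getD "length" 0)) (some p.2) ++ p.1,
             d.getD "offset" 0))
          ([], (cs.length : Int))).2))
      ++ (es.foldr
          (fun e (p : List Char × Int) =>
            let d : PySem.Dict String Int := PySem.Dict.mk e
            (PySem.List.slice cs (some (d.getD "offset" 0 + d.getD "length" 0)) (some p.2) ++ p.1,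
             d.getD "offset" 0))
          ([], (cs.length : Int))).1
    = (pvSegsL cs (cs.length : Int) es c).flatten := by
  induction es generalizing c with
  | nil => simp [pvSegsL]
  | cons e es ih => simp [pvSegsL, List.foldr_cons, ← ih]

theorem pv_main (text : String) (entities : List (List (String × Int))) :
    strip_entities_py text entities = strip_entities_py_alt text entities := by
  apply String.toList_inj.mp
  unfold strip_entities_py strip_entities_py_alt
  rw [pvA_fold]
  simp only [List.nil_append, List.singleton_append]
  rw [pvA_zip, List.nil_append, pvJoin_flatten, pvSegs_toList, List.foldl_reverse]
  rw [← PySem.List.slice_zero_start, pvB_foldr]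
  simp [pysem, PySem.Str.len]

-- ===== VERDICT (by name: the statement is the Claim_ definition above) =====
theorem strip_entities_py_spec : Claim_equal_strip_entities_py := by
  intro text entities _ _
  unfold Spec_strip_entities_py
  exact pv_main text entities
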